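-- pv_equiv track=rewrite | github.com/michaelpatrickpurcell/permutation-fair-dice | utils.py | dice_to_word
-- ===== SOURCE A (Python) =====
-- def dice_to_word(dice):
--     dice_names = list(dice.keys())
--     m = len(dice_names)
--     d = len(dice[dice_names[0]])
--     foo = [[(x, dice[x][i]) for i in range(d)] for x in dice_names]
--     bar = sum(foo, [])
--     ram = sorted(bar, key=lambda x: x[1])
--     word = "".join([t[0] for t in ram])
--     return word
-- ===== SOURCE B (Python) =====
-- def dice_to_word(dice):
--     names = list(dice.keys())
--     d = len(dice[names[0]])
--     values = sorted({dice[name][i] for name in names for i in range(d)})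
--     return "".join(name for v in values
--                         for name in names
--                         for i in range(d)
--                         if dice[name][i] == v)
-- ===== Notes on version B (the rewrite author's own statement) =====
-- stated objective: alternative
-- what changed: Instead of flattening all (name,value) pairs and stably comparison-sorting them, B sorts only the set of distinct face values and then, for each value in increasing order, rescans the dice in name order emitting each name once per matching face; it trades speed (an extra factor of the number of distinct values) for a sort over a usually tiny value set and no pair list, and A's stable tie-breaking falls out of the name-major scan order.
import Mathlib
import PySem

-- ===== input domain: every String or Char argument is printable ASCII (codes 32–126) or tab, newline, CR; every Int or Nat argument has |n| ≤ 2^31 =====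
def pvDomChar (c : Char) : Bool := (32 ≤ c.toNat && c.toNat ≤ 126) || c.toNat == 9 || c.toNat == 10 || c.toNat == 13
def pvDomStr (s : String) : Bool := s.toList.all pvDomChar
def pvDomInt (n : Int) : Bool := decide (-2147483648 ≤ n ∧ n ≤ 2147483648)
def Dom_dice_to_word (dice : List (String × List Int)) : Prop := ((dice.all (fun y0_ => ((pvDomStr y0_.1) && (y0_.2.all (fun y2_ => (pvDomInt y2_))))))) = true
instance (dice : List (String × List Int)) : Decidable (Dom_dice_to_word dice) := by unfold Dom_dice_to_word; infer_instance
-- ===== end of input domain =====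

-- B replaces A's flatten-then-stable-sort of all (name, value) pairs by sorting only the
-- distinct face values and, for each value in increasing order, scanning the dice in name
-- order emitting each name once per matching face (alternative decomposition, same result).

-- ===== PORT A =====
def dice_to_word (dice : List (String × List Int)) : String :=
  let dct := PySem.Dict.ofList dice
  let dice_names := dct.keys
  let _m := dice_names.length
  let d := (dct.getD ((PySem.List.pyGet? dice_names 0).getD "") []).length
  let foo := dice_names.map (fun x =>
    (PySem.List.pyRange 0 (d : Int) 1).map (fun i =>
      (x, (PySem.List.pyGet? (dct.getD x []) i).getD 0)))
  let bar := foo.foldl (fun acc l => acc ++ l) []   -- sum(foo, [])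
  let ram := PySem.List.sorted bar (fun t => t.2)
  PySem.Str.join "" (ram.map (fun t => t.1))

-- ===== PORT B =====
def dice_to_word_alt (dice : List (String × List Int)) : String :=
  let dct := PySem.Dict.ofList dice
  let names := dct.keys
  let d := (dct.getD ((PySem.List.pyGet? names 0).getD "") []).length
  let values := PySem.List.sorted
    (PySem.Set.ofList (names.flatMap (fun name =>
      (PySem.List.pyRange 0 (d : Int) 1).map (fun i =>
        (PySem.List.pyGet? (dct.getD name []) i).getD 0))))
    (fun v => v)
  PySem.Str.join ""
    (values.flatMap (fun v =>
      names.flatMap (fun name =>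
        (((PySem.List.pyRange 0 (d : Int) 1).filter (fun i =>
            (PySem.List.pyGet? (dct.getD name []) i).getD 0 == v)).map (fun _ => name)))))

-- ===== PRECONDITION & SPEC =====
-- Pre_ excludes exactly the inputs where the Python A raises: an empty dict
-- (dice_names[0] is an IndexError) or a die shorter than the first one
-- (dice[x][i] is an IndexError for some i < d).
def Pre_dice_to_word (dice : List (String × List Int)) : Prop :=
  dice ≠ [] ∧ ∀ kv ∈ (PySem.Dict.ofList dice).items,
    ((PySem.Dict.ofList dice).items.headD ("", [])).2.length ≤ kv.2.length
instance (dice : List (String × List Int)) : Decidable (Pre_dice_to_word dice) := by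
  unfold Pre_dice_to_word; infer_instance
def pvWitness_dice_to_word : (List (String × List Int)) := [("a", [2, 1]), ("b", [1, 3])]

def Spec_dice_to_word (dice : List (String × List Int)) (out : String) : Prop := out = dice_to_word_alt dice
instance (dice : List (String × List Int)) (out : String) : Decidable (Spec_dice_to_word dice out) := by unfold Spec_dice_to_word; infer_instance

-- ===== CLAIM (what is proved, stated in full; the proofs are below) =====
def Claim_equal_dice_to_word : Prop := ∀ (dice : List (String × List Int)), Dom_dice_to_word dice → Pre_dice_to_word dice → Spec_dice_to_word dice (dice_to_word dice)

-- ===== LEMMAS AND PROOFS =====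

theorem insertBy_cons_true {α : Type} (before : α → α → Bool) (x y : α) (ys : List α)
    (h : before x y = true) :
    PySem.List.insertBy before x (y :: ys) = x :: y :: ys := by
  simp [PySem.List.insertBy, h]

theorem insertBy_cons_false {α : Type} (before : α → α → Bool) (x y : α) (ys : List α)
    (h : before x y = false) :
    PySem.List.insertBy before x (y :: ys) = y :: PySem.List.insertBy before x ys := by
  simp [PySem.List.insertBy, h]

theorem insertBy_append_false {α : Type} (before : α → α → Bool) (x : α) (as bs : List α)
    (h : ∀ a ∈ as, before x a = false) :
    PySem.List.insertBy before x (as ++ bs) = as ++ PySem.List.insertBy before x bs := by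
  induction as with
  | nil => simp
  | cons a t ih =>
    rw [List.cons_append, insertBy_cons_false before x a (t ++ bs) (h a (by simp)),
      ih (fun a ha => h a (by simp [ha]))]
    rfl

theorem insertBy_all_true {α : Type} (before : α → α → Bool) (x : α) (l : List α)
    (h : ∀ a ∈ l, before x a = true) :
    PySem.List.insertBy before x l = x :: l := by
  cases l with
  | nil => rfl
  | cons a t => exact insertBy_cons_true before x a t (h a (by simp))

-- Inserting one pair into a bucket decomposition (strictly increasing bucket values,
-- every bucket nonempty and value-homogeneous) appends it to its bucket, creating the
-- bucket at the sorted position if its value is new.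
theorem crux (p : String × Int) (V : List Int) (g : Int → List (String × Int))
    (hg : ∀ v ∈ V, ∀ q ∈ g v, q.2 = v)
    (hne : ∀ v ∈ V, g v ≠ [])
    (hs : V.Pairwise (· < ·)) :
    PySem.List.insertBy (fun a b => decide (a.2 < b.2)) p (V.flatMap g) =
      if p.2 ∈ V then V.flatMap (fun v => if v = p.2 then g v ++ [p] else g v)
      else (PySem.List.insertBy (fun a b => decide (a < b)) p.2 V).flatMap
        (fun v => if v = p.2 then [p] else g v) := by
  induction V with
  | nil => simp [PySem.List.insertBy]
  | cons v rest ih =>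
    have hgv : ∀ q ∈ g v, q.2 = v := hg v (by simp)
    have hrest_gt : ∀ w ∈ rest, v < w := (List.pairwise_cons.mp hs).1
    rcases lt_trichotomy p.2 v with hlt | heq | hgt
    · -- p.2 < v : p goes in front, new bucket first
      have hmem : p.2 ∉ v :: rest := by
        intro hm
        rcases List.mem_cons.mp hm with h | h
        · omega
        · exact absurd (hrest_gt _ h) (by omega)
      rw [if_neg hmem]
      obtain ⟨q0, t0, hgv0⟩ : ∃ q0 t0, g v = q0 :: t0 := by
        cases hge : g v with
        | nil => exact absurd hge (hne v (by simp))
        | cons a b => exact ⟨a, b, rfl⟩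
      have hb : (fun (a b : String × Int) => decide (a.2 < b.2)) p q0 = true := by
        simp [hgv q0 (by simp [hgv0]), hlt]
      rw [List.flatMap_cons, hgv0, List.cons_append,
        insertBy_cons_true _ p q0 _ hb,
        insertBy_cons_true _ p.2 v rest (by simp [hlt])]
      rw [List.flatMap_cons, List.flatMap_cons]
      rw [if_pos rfl, if_neg (by omega), hgv0]
      have : rest.flatMap (fun w => if w = p.2 then [p] else g w) = rest.flatMap g := by
        apply List.flatMap_congr
        intro w hw
        rw [if_neg (by have := hrest_gt w hw; omega)]
      rw [this]
      rfl
    · -- p.2 = v : p appended to the bucket of v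
      have hmem : p.2 ∈ v :: rest := by simp [heq]
      rw [if_pos hmem, List.flatMap_cons, List.flatMap_cons,
        insertBy_append_false _ p (g v) _
          (by intro a ha; simp [hgv a ha, heq]),
        insertBy_all_true _ p (rest.flatMap g)
          (by
            intro a ha
            obtain ⟨w, hw, haw⟩ := List.mem_flatMap.mp ha
            have := hg w (by simp [hw]) a haw
            simp [this, heq ▸ hrest_gt w hw])]
      rw [if_pos heq.symm]
      have : rest.flatMap (fun w => if w = p.2 then g w ++ [p] else g w) = rest.flatMap g := by
        apply List.flatMap_congr
        intro w hw
        rw [if_neg (by have := hrest_gt w hw; omega)]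
      rw [this]
      simp
    · -- v < p.2 : skip the first bucket and recurse
      have hne' : v ≠ p.2 := by omega
      have hskip : PySem.List.insertBy (fun a b => decide (a.2 < b.2)) p
          ((v :: rest).flatMap g) =
          g v ++ PySem.List.insertBy (fun a b => decide (a.2 < b.2)) p (rest.flatMap g) := by
        rw [List.flatMap_cons]
        exact insertBy_append_false _ p (g v) _ (by intro a ha; simp [hgv a ha]; omega)
      rw [hskip, ih (fun w hw => hg w (by simp [hw])) (fun w hw => hne w (by simp [hw]))
        (List.pairwise_cons.mp hs).2]
      by_cases hm : p.2 ∈ rest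
      · rw [if_pos hm, if_pos (by simp [hm]), List.flatMap_cons, if_neg hne']
      · have hmem : p.2 ∉ v :: rest := by simp [hm, Ne.symm hne']
        rw [if_neg hm, if_neg hmem,
          insertBy_cons_false _ p.2 v rest (by simp; omega),
          List.flatMap_cons, if_neg hne']

-- A stable sort by second component equals concatenation of the value buckets
-- taken in increasing order of the distinct values.
theorem sorted_eq_buckets (L : List (String × Int)) :
    PySem.List.sorted L (fun t => t.2) =
      (PySem.List.sorted (PySem.Set.ofList (L.map (fun t => t.2))) (fun v => v)).flatMap
        (fun v => L.filter (fun p => p.2 == v)) := by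
  induction L using List.reverseRecOn with
  | nil => rfl
  | append_singleton L p ih =>
    have hA : PySem.List.sorted (L ++ [p]) (fun t => t.2) =
        PySem.List.insertBy (fun a b => decide (a.2 < b.2)) p
          (PySem.List.sorted L (fun t => t.2)) := by
      rw [PySem.List.sorted_eq_foldl_insertBy, PySem.List.sorted_eq_foldl_insertBy,
        List.foldl_append]
      rfl
    set V := PySem.List.sorted (PySem.Set.ofList (L.map (fun t => t.2))) (fun v => v) with hV
    have hg : ∀ v ∈ V, ∀ q ∈ L.filter (fun p => p.2 == v), q.2 = v := by
      intro v _ q hq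
      simpa using (List.of_mem_filter hq)
    have hne : ∀ v ∈ V, L.filter (fun p => p.2 == v) ≠ [] := by
      intro v hv
      have : v ∈ L.map (fun t => t.2) := by
        have := (PySem.List.mem_sorted _ _ _ v).mp hv
        exact (PySem.Set.mem_ofList _ _).mp this
      obtain ⟨q, hq, hqv⟩ := List.mem_map.mp this
      intro hnil
      have : q ∈ L.filter (fun p => p.2 == v) := List.mem_filter.mpr ⟨hq, by simp [hqv]⟩
      simp [hnil] at this
    have hs : V.Pairwise (· < ·) := PySem.List.sorted_ofList_pairwise_lt _
    rw [hA, ih, crux p V _ hg hne hs]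
    by_cases hmem : p.2 ∈ V
    · -- existing value: same value list, p joins its bucket
      have hmemL : p.2 ∈ PySem.Set.ofList (L.map (fun t => t.2)) :=
        (PySem.List.mem_sorted _ _ _ p.2).mp hmem
      have hofList : PySem.Set.ofList ((L ++ [p]).map (fun t => t.2)) =
          PySem.Set.ofList (L.map (fun t => t.2)) := by
        rw [List.map_append, PySem.Set.ofList, List.foldl_append]
        simp only [List.map_cons, List.map_nil, List.foldl_cons, List.foldl_nil]
        rw [← PySem.Set.ofList, PySem.Set.add,
          if_pos (by simpa [PySem.Set.contains_iff] using hmemL)]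
      rw [if_pos hmem, hofList, ← hV]
      apply List.flatMap_congr
      intro v _
      rw [List.filter_append]
      by_cases hv : v = p.2
      · simp [hv]
      · simp [hv, Ne.symm hv]
    · -- new value: it is inserted into the sorted value list, with bucket [p]
      have hmemL : p.2 ∉ PySem.Set.ofList (L.map (fun t => t.2)) := by
        intro h
        exact hmem ((PySem.List.mem_sorted _ _ _ p.2).mpr h)
      have hmemL' : p.2 ∉ L.map (fun t => t.2) := by
        intro h; exact hmemL ((PySem.Set.mem_ofList _ _).mpr h)
      have hofList : PySem.Set.ofList ((L ++ [p]).map (fun t => t.2)) =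
          PySem.Set.ofList (L.map (fun t => t.2)) ++ [p.2] := by
        rw [List.map_append, PySem.Set.ofList, List.foldl_append]
        simp only [List.map_cons, List.map_nil, List.foldl_cons, List.foldl_nil]
        rw [← PySem.Set.ofList, PySem.Set.add,
          if_neg (by simpa [PySem.Set.contains_iff] using hmemL)]
      have hV' : PySem.List.sorted (PySem.Set.ofList ((L ++ [p]).map (fun t => t.2)))
          (fun v => v) = PySem.List.insertBy (fun a b => decide (a < b)) p.2 V := by
        rw [hofList, PySem.List.sorted_eq_foldl_insertBy, List.foldl_append,
          ← PySem.List.sorted_eq_foldl_insertBy]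
        rfl
      have hgnil : L.filter (fun q => q.2 == p.2) = [] := by
        rw [List.filter_eq_nil_iff]
        intro q hq hq2
        exact hmemL' (List.mem_map.mpr ⟨q, hq, by simpa using hq2⟩)
      rw [if_neg hmem, hV']
      apply List.flatMap_congr
      intro v _
      rw [List.filter_append]
      by_cases hv : v = p.2
      · simp [hv, hgnil]
      · simp [hv, Ne.symm hv]

-- The heart of the equivalence, stated for an arbitrary name list, face function and index list.
theorem key_thm (names : List String) (face : String → Int → Int) (r : List Int) :
    PySem.Str.join ""
      ((PySem.List.sorted (names.flatMap (fun x => r.map (fun i => (x, face x i))))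
        (fun t => t.2)).map (fun t => t.1)) =
    PySem.Str.join ""
      ((PySem.List.sorted
          (PySem.Set.ofList (names.flatMap (fun x => r.map (fun i => face x i))))
          (fun v => v)).flatMap
        (fun v => names.flatMap (fun x =>
          (r.filter (fun i => face x i == v)).map (fun _ => x)))) := by
  congr 1
  rw [sorted_eq_buckets, List.map_flatMap]
  have hvals : (names.flatMap (fun x => r.map (fun i => (x, face x i)))).map
      (fun t => t.2) = names.flatMap (fun x => r.map (fun i => face x i)) := by
    rw [List.map_flatMap]
    simp [List.map_map, Function.comp_def]
  rw [hvals]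
  apply List.flatMap_congr
  intro v _
  rw [List.filter_flatMap, List.map_flatMap]
  apply List.flatMap_congr
  intro x _
  rw [List.filter_map, List.map_map]
  rfl

-- ===== VERDICT (by name: the statement is the Claim_ definition above) =====
theorem dice_to_word_spec : Claim_equal_dice_to_word := by
  intro dice _ _
  unfold Spec_dice_to_word dice_to_word dice_to_word_alt
  simp only []
  rw [PySem.List.foldl_append_eq_flatMap (fun l => l)]
  rw [List.nil_append, List.flatMap_def, List.map_map]
  exact key_thm _ _ _
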